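-- pv_equiv track=rewrite | github.com/MikeFlores19/FUNDAMENTOS-IA | HANGMAN.py | buscar_palabra_ancho
-- ===== SOURCE A (Python) =====
-- from collections import deque
--
-- def buscar_palabra_ancho(grafo, palabra):
--     # Usar una cola para la búsqueda en amplitud
--     cola = deque(["raiz"])  # Iniciar la cola con el nodo raíz
--     nodos_recorridos = 0  # Contador de nodos recorridos
--
--     while len(cola) > 0:
--         nodo_actual = cola.popleft()  # Sacar el nodo de la cola
--         nodos_recorridos += 1  # Incrementar el contador
--
--         # Comprobar si el nodo actual es igual a la palabra
--         if nodo_actual == palabra: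
--             return True, nodos_recorridos  # Se encontró la palabra y el número de nodos recorridos
--         # Añadir hijos a la cola
--         else:
--             for hijo in grafo[nodo_actual]:
--                 cola.append(hijo)  # Añadir los hijos a la cola
--     return False, nodos_recorridos  # La palabra no se encontró
-- ===== SOURCE B (Python) =====
-- def buscar_palabra_ancho(grafo, palabra):
--     # Level-synchronous BFS: process one frontier (level) at a time.
--     nodos_recorridos = 0
--     frontera = ["raiz"]
--     while frontera:
--         siguiente = []
--         for nodo in frontera:
--             nodos_recorridos += 1
--             if nodo == palabra:
--                 return True, nodos_recorridos
--             siguiente.extend(grafo[nodo])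
--         frontera = siguiente
--     return False, nodos_recorridos
-- ===== Notes on version B (the rewrite author's own statement) =====
-- stated objective: alternative
-- what changed: Replaced the single deque pop-loop with a level-synchronous BFS: a nested outer loop over successive frontier lists and an inner left-to-right loop over one frontier, building the next frontier by extend; no deque is used and the visit order and count are preserved.
-- outside the precondition, e.g. on buscar_palabra_ancho({'raiz': ['x', 'q'], 'x': []}, 'x'): A returns (True, 2), B returns (True, 2); on buscar_palabra_ancho({'raiz': ['x', 'y']}, 'z'): A raises KeyError, B raises KeyError
import Mathlib
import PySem

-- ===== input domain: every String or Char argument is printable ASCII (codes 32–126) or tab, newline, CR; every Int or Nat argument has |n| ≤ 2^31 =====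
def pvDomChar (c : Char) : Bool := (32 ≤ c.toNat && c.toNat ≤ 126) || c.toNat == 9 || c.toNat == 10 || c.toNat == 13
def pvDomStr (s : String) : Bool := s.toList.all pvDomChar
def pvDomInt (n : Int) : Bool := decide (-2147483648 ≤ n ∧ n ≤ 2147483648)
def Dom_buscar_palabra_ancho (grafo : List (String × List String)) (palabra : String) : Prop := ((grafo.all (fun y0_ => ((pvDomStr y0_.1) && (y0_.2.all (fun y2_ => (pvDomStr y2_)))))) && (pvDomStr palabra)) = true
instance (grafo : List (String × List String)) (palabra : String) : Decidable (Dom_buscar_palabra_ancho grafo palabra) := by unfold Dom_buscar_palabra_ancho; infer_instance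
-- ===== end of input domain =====

-- B rewrites the BFS as a level-synchronous nested loop over frontiers (objective: alternative decomposition, same cost).
-- Both loops are total in Python only on Pre_; the Lean ports carry the same fuel bound as a totality guard
-- (a missing key, a Python KeyError, makes the port return (false, count) — excluded by Pre_).

-- shared totality guard: enough fuel for any run on a Pre_-admissible graph (the proof is fuel-independent)
def pvFuel (grafo : List (String × List String)) : Nat :=
  (grafo.length + 2) * ((grafo.map (fun p => p.2.length)).foldl max 0 + 1) ^ (grafo.length + 1) + 1

-- ===== PORT A =====
-- the deque loop: pop the front, count, test, append children at the back
def pvBfsA (grafo : List (String × List String)) (palabra : String) :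
    Nat → List String → Int → Bool × Int
  | _, [], cnt => (false, cnt)
  | 0, _ :: _, cnt => (false, cnt)
  | fuel + 1, nodo :: cola, cnt =>
    let cnt' := cnt + 1
    if nodo = palabra then (true, cnt')
    else
      match PySem.Dict.get? (PySem.Dict.mk grafo) nodo with
      | none => (false, cnt')  -- Python raises KeyError here; outside Pre_
      | some hijos => pvBfsA grafo palabra fuel (cola ++ hijos) cnt'

def buscar_palabra_ancho (grafo : List (String × List String)) (palabra : String) : Bool × Int :=
  pvBfsA grafo palabra (pvFuel grafo) ["raiz"] 0

-- ===== PORT B =====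
-- inner loop of B: walk one frontier left to right, accumulating the next frontier;
-- .inl = early return (found / fuel or key guard), .inr = frontier exhausted
def pvLevel (grafo : List (String × List String)) (palabra : String) :
    List String → List String → Int → Nat → (Bool × Int) ⊕ (List String × Int × Nat)
  | [], sig, cnt, fuel => .inr (sig, cnt, fuel)
  | _ :: _, _, cnt, 0 => .inl (false, cnt)
  | nodo :: resto, sig, cnt, fuel + 1 =>
    let cnt' := cnt + 1
    if nodo = palabra then .inl (true, cnt')
    else
      match PySem.Dict.get? (PySem.Dict.mk grafo) nodo with
      | none => .inl (false, cnt')  -- Python raises KeyError here; outside Pre_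
      | some hijos => pvLevel grafo palabra resto (sig ++ hijos) cnt' fuel

-- each processed node consumes exactly one unit of fuel (cited by pvOuter's decreasing_by)
theorem pvLevel_inr_fuel (grafo : List (String × List String)) (palabra : String) :
    ∀ (front sig : List String) (cnt : Int) (fuel : Nat) (n : List String) (c : Int) (f : Nat),
      pvLevel grafo palabra front sig cnt fuel = .inr (n, c, f) → f + front.length = fuel := by
  intro front
  induction front with
  | nil => intro sig cnt fuel n c f h; simp [pvLevel] at h; simp [h.2.2]
  | cons x resto ih =>
    intro sig cnt fuel n c f h
    cases fuel with
    | zero => simp [pvLevel] at h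
    | succ fuel =>
      simp only [pvLevel] at h
      split at h
      · exact absurd h (by simp)
      · split at h
        · exact absurd h (by simp)
        · have := ih _ _ _ _ _ _ h
          simp [List.length_cons]; omega

-- outer loop of B: repeat over non-empty frontiers
def pvOuter (grafo : List (String × List String)) (palabra : String) :
    List String → Int → Nat → Bool × Int
  | [], cnt, _ => (false, cnt)
  | x :: resto, cnt, fuel =>
    match h : pvLevel grafo palabra (x :: resto) [] cnt fuel with
    | .inl r => r
    | .inr (sig, cnt', fuel') => pvOuter grafo palabra sig cnt' fuel'
  termination_by _ _ fuel => fuel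
  decreasing_by
    have := pvLevel_inr_fuel grafo palabra (x :: resto) [] cnt fuel sig cnt' fuel' h
    simp [List.length_cons] at this; omega

def buscar_palabra_ancho_alt (grafo : List (String × List String)) (palabra : String) : Bool × Int :=
  pvOuter grafo palabra ["raiz"] 0 (pvFuel grafo)

-- ===== PRECONDITION & SPEC =====
-- graph-shape helpers used only by Pre_: keys, children, and saturated reachability over the input graph
def pvKeys (grafo : List (String × List String)) : List String := grafo.map Prod.fst
def pvChildren (grafo : List (String × List String)) (x : String) : List String :=
  (PySem.Dict.get? (PySem.Dict.mk grafo) x).getD []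
def pvStep (grafo : List (String × List String)) (s : List String) : List String :=
  (s ++ s.flatMap (pvChildren grafo)).dedup
def pvReach (grafo : List (String × List String)) (start : List String) : List String :=
  (pvStep grafo)^[grafo.length + 1] start

-- Pre_ excludes the inputs on which A has no dependable value: graphs with a child other than palabra (or a
-- missing "raiz") that is not a dictionary key — there A raises KeyError unless palabra happens to be dequeued
-- first, a race on traversal order with no closed form — and graphs whose reachable part is cyclic while
-- palabra is unreachable, where the visited-set-free BFS loops forever.
def Pre_buscar_palabra_ancho (grafo : List (String × List String)) (palabra : String) : Prop :=
  palabra = "raiz" ∨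
  ("raiz" ∈ pvKeys grafo ∧ (∀ p ∈ grafo, ∀ c ∈ p.2, c ∈ pvKeys grafo ∨ c = palabra) ∧
   (palabra ∈ pvReach grafo ["raiz"] ∨
    ∀ k ∈ pvReach grafo ["raiz"], k ∉ pvReach grafo (pvChildren grafo k)))
instance (grafo : List (String × List String)) (palabra : String) : Decidable (Pre_buscar_palabra_ancho grafo palabra) := by unfold Pre_buscar_palabra_ancho; infer_instance

def pvWitness_buscar_palabra_ancho : (List (String × List String)) × String :=
  ([("raiz", ["a", "b"]), ("a", ["b"]), ("b", [])], "b")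

def Spec_buscar_palabra_ancho (grafo : List (String × List String)) (palabra : String) (out : Bool × Int) : Prop := out = buscar_palabra_ancho_alt grafo palabra
instance (grafo : List (String × List String)) (palabra : String) (out : Bool × Int) : Decidable (Spec_buscar_palabra_ancho grafo palabra out) := by unfold Spec_buscar_palabra_ancho; infer_instance

-- ===== CLAIM (what is proved, stated in full; the proofs are below) =====
def Claim_equal_buscar_palabra_ancho : Prop := ∀ (grafo : List (String × List String)) (palabra : String), Dom_buscar_palabra_ancho grafo palabra → Pre_buscar_palabra_ancho grafo palabra → Spec_buscar_palabra_ancho grafo palabra (buscar_palabra_ancho grafo palabra)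

-- ===== LEMMAS AND PROOFS =====

-- pvOuter's one-step unfolding on a non-empty frontier, as a plain (non-dependent) match
theorem pvOuter_cons (grafo : List (String × List String)) (palabra x : String)
    (resto : List String) (cnt : Int) (fuel : Nat) :
    pvOuter grafo palabra (x :: resto) cnt fuel =
      (match pvLevel grafo palabra (x :: resto) [] cnt fuel with
       | .inl r => r
       | .inr (n, c, f) => pvOuter grafo palabra n c f) := by
  rw [pvOuter.eq_def]
  split <;> (try split) <;> simp_all

-- the frontier/next pair of B concatenates to A's queue; proved for every fuel, so the ports agree everywhere
theorem pvBfs_eq_level (grafo : List (String × List String)) (palabra : String) :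
    ∀ (fuel : Nat) (front sig : List String) (cnt : Int),
      pvBfsA grafo palabra fuel (front ++ sig) cnt =
        (match pvLevel grafo palabra front sig cnt fuel with
         | .inl r => r
         | .inr (n, c, f) => pvOuter grafo palabra n c f) := by
  intro fuel
  induction fuel using Nat.strong_induction_on with
  | _ fuel ih =>
    have hcons : ∀ (x : String) (resto sig : List String) (cnt : Int),
        pvBfsA grafo palabra fuel (x :: resto ++ sig) cnt =
          (match pvLevel grafo palabra (x :: resto) sig cnt fuel with
           | .inl r => r
           | .inr (n, c, f) => pvOuter grafo palabra n c f) := by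
      intro x resto sig cnt
      cases fuel with
      | zero => simp [pvBfsA, pvLevel]
      | succ fuel =>
        by_cases hx : x = palabra
        · simp [pvBfsA, pvLevel, hx]
        · cases hg : PySem.Dict.get? (PySem.Dict.mk grafo) x with
          | none => simp [pvBfsA, pvLevel, hx, hg]
          | some hijos =>
            have := ih fuel (Nat.lt_succ_self _) resto (sig ++ hijos) (cnt + 1)
            simp [pvBfsA, pvLevel, hx, hg, this]
    intro front sig cnt
    cases front with
    | cons x resto => exact hcons x resto sig cnt
    | nil =>
      simp only [List.nil_append, pvLevel]
      cases sig with
      | nil => simp [pvBfsA, pvOuter]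
      | cons y ys =>
        rw [pvOuter_cons]
        have := hcons y ys [] cnt
        simpa using this

-- ===== VERDICT (by name: the statement is the Claim_ definition above) =====
theorem buscar_palabra_ancho_spec : Claim_equal_buscar_palabra_ancho := by
  intro grafo palabra _ _
  unfold Spec_buscar_palabra_ancho buscar_palabra_ancho buscar_palabra_ancho_alt
  have h := pvBfs_eq_level grafo palabra (pvFuel grafo) ["raiz"] [] 0
  simp only [List.append_nil] at h
  rw [h, pvOuter_cons]
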